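-- pv_equiv track=rewrite | github.com/Rucha1811/SmartMoney | predict_stocks.py | _get_market_outlook
-- ===== SOURCE A (Python) =====
-- from typing import Dict, List, Optional, Any
--
-- def _get_market_outlook(predictions: List[Dict]) -> str:
--     """Generate market outlook based on predictions"""
--     buys = len([p for p in predictions if p['prediction'] == 'BUY'])
--     sells = len([p for p in predictions if p['prediction'] == 'SELL'])
--     holds = len([p for p in predictions if p['prediction'] == 'HOLD'])
--
--     if buys > sells:
--         return f"Bullish sentiment: {buys} BUY signals vs {sells} SELL signals"
--     elif sells > buys:
--         return f"Bearish sentiment: {sells} SELL signals vs {buys} BUY signals"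
--     else:
--         return f"Mixed sentiment: {buys} BUY, {sells} SELL, {holds} HOLD"
-- ===== SOURCE B (Python) =====
-- def _get_market_outlook(predictions):
--     """Generate market outlook based on predictions"""
--     ordered = sorted(p['prediction'] for p in predictions)
--     counts = {}
--     i, n = 0, len(ordered)
--     while i < n:
--         j = i
--         while j < n and ordered[j] == ordered[i]:
--             j += 1
--         counts[ordered[i]] = j - i
--         i = j
--     buys = counts.get('BUY', 0)
--     sells = counts.get('SELL', 0)
--     holds = counts.get('HOLD', 0)
--     if buys > sells:
--         return f"Bullish sentiment: {buys} BUY signals vs {sells} SELL signals"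
--     elif sells > buys:
--         return f"Bearish sentiment: {sells} SELL signals vs {buys} BUY signals"
--     else:
--         return f"Mixed sentiment: {buys} BUY, {sells} SELL, {holds} HOLD"
-- ===== Notes on version B (the rewrite author's own statement) =====
-- stated objective: alternative
-- what changed: Replaces A's three separate list-comprehension filter scans with a sort-then-run-scan: the labels are sorted once and equal labels, now adjacent, are counted by measuring run lengths in a single two-pointer sweep into a dict.
import Mathlib
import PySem

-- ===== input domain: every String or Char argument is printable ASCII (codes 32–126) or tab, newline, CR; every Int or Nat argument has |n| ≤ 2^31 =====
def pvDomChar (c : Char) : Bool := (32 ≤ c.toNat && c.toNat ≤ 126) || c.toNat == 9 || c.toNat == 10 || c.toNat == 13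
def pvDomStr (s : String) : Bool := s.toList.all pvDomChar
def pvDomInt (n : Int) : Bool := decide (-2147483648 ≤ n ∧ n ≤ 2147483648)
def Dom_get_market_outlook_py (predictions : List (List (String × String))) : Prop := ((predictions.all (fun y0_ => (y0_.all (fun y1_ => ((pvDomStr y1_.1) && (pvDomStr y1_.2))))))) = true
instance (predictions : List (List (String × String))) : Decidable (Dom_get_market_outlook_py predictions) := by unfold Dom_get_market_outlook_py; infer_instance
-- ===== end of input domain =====

-- B replaces A's three filtering scans by sorting the labels once and counting adjacent runs in one sweep (alternative algorithm, return value only; no argument is mutated).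


-- ===== PORT A =====
-- A: three list-comprehension scans, one per signal kind, then a three-branch comparison.
def get_market_outlook_py (predictions : List (List (String × String))) : String :=
  let buys : Int := ((predictions.filter (fun p => (PySem.Dict.mk p).get? "prediction" == some "BUY")).length : Int)
  let sells : Int := ((predictions.filter (fun p => (PySem.Dict.mk p).get? "prediction" == some "SELL")).length : Int)
  let holds : Int := ((predictions.filter (fun p => (PySem.Dict.mk p).get? "prediction" == some "HOLD")).length : Int)
  if buys > sells then
    "Bullish sentiment: " ++ PySem.Int.toStr buys ++ " BUY signals vs " ++ PySem.Int.toStr sells ++ " SELL signals"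
  else if sells > buys then
    "Bearish sentiment: " ++ PySem.Int.toStr sells ++ " SELL signals vs " ++ PySem.Int.toStr buys ++ " BUY signals"
  else
    "Mixed sentiment: " ++ PySem.Int.toStr buys ++ " BUY, " ++ PySem.Int.toStr sells ++ " SELL, " ++ PySem.Int.toStr holds ++ " HOLD"

-- ===== PORT B =====
-- B's run sweep over the sorted labels: the inner 'while ordered[j] == ordered[i]' is the
-- equal-prefix (takeWhile), 'i = j' continues after it (dropWhile); 'counts[label] = j - i'
-- is the dict insert of the run length.
def pvRunCount : List String → PySem.Dict String Int → PySem.Dict String Int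
  | [], counts => counts
  | x :: rest, counts =>
    pvRunCount (rest.dropWhile (· == x))
      (counts.insert x (((rest.takeWhile (· == x)).length : Int) + 1))
termination_by l _ => l.length
decreasing_by
  have := List.length_dropWhile_le (p := (· == x)) (l := rest)
  simp; omega

-- B: sort the labels once, count adjacent runs in one sweep, then three lookups.
-- (outside Pre_ the generator's missing-key KeyError is modelled by .getD "", as in port A's == test)
def get_market_outlook_py_alt (predictions : List (List (String × String))) : String :=
  let ordered := PySem.List.sorted (predictions.map (fun p => ((PySem.Dict.mk p).get? "prediction").getD "")) (fun s => s) false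
  let counts := pvRunCount ordered PySem.Dict.empty
  let buys : Int := counts.getD "BUY" 0
  let sells : Int := counts.getD "SELL" 0
  let holds : Int := counts.getD "HOLD" 0
  if buys > sells then
    "Bullish sentiment: " ++ PySem.Int.toStr buys ++ " BUY signals vs " ++ PySem.Int.toStr sells ++ " SELL signals"
  else if sells > buys then
    "Bearish sentiment: " ++ PySem.Int.toStr sells ++ " SELL signals vs " ++ PySem.Int.toStr buys ++ " BUY signals"
  else
    "Mixed sentiment: " ++ PySem.Int.toStr buys ++ " BUY, " ++ PySem.Int.toStr sells ++ " SELL, " ++ PySem.Int.toStr holds ++ " HOLD"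

-- ===== PRECONDITION & SPEC =====
-- Pre_ excludes exactly the inputs where some element lacks the key 'prediction':
-- there both A and B raise KeyError (no value is returned by either).
def Pre_get_market_outlook_py (predictions : List (List (String × String))) : Prop :=
  ∀ p ∈ predictions, (PySem.Dict.mk p).contains "prediction" = true
instance (predictions : List (List (String × String))) : Decidable (Pre_get_market_outlook_py predictions) := by unfold Pre_get_market_outlook_py; infer_instance

def pvWitness_get_market_outlook_py : (List (List (String × String))) :=
  [[("prediction", "BUY")], [("prediction", "SELL"), ("x", "y")]]

def Spec_get_market_outlook_py (predictions : List (List (String × String))) (out : String) : Prop := out = get_market_outlook_py_alt predictions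
instance (predictions : List (List (String × String))) (out : String) : Decidable (Spec_get_market_outlook_py predictions out) := by unfold Spec_get_market_outlook_py; infer_instance

-- ===== CLAIM =====
def Claim_equal_get_market_outlook_py : Prop := ∀ (predictions : List (List (String × String))), Dom_get_market_outlook_py predictions → Pre_get_market_outlook_py predictions → Spec_get_market_outlook_py predictions (get_market_outlook_py predictions)

-- ===== LEMMAS AND PROOFS =====

-- a dict containing a key has a some lookup (by induction over the association list)
theorem get?_isSome_of_mem {k : String} {p : List (String × String)}
    (h : ∃ x, (k, x) ∈ p) : ((PySem.Dict.mk p).get? k).isSome := by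
  induction p with
  | nil => simp at h
  | cons hd tl ih =>
    rw [PySem.Dict.get?_mk_cons]
    by_cases he : hd.1 == k
    · simp [he]
    · simp only [he, Bool.false_eq_true, if_neg, not_false_eq_true]
      apply ih
      obtain ⟨x, hx⟩ := h
      rcases List.mem_cons.mp hx with h1 | h2
      · exfalso; apply he; rw [← h1]; simp
      · exact ⟨x, h2⟩

-- the run sweep over a ≤-sorted list: lookups read off exact multiplicities
theorem pvRunCount_getD (v : String) :
    ∀ (l : List String) (d : PySem.Dict String Int), l.Pairwise (· ≤ ·) →
      (pvRunCount l d).getD v 0 = if v ∈ l then (l.count v : Int) else d.getD v 0 := by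
  intro l d
  induction l, d using pvRunCount.induct with
  | case1 d => intro _; simp [pvRunCount]
  | case2 x rest counts' ih =>
    intro hp
    have hp' : (rest.dropWhile (· == x)).Pairwise (· ≤ ·) :=
      (List.Pairwise.sublist (List.dropWhile_sublist _) (List.pairwise_cons.mp hp).2)
    have hxrest : ∀ y ∈ rest, x ≤ y := (List.pairwise_cons.mp hp).1
    -- x does not occur in the dropWhile tail
    have hxdrop : x ∉ rest.dropWhile (· == x) := by
      intro hmem
      rcases hd : rest.dropWhile (· == x) with _ | ⟨h1, t1⟩
      · simp [hd] at hmem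
      · have hne : (h1 == x) = false := by
          have hnil : rest.dropWhile (· == x) ≠ [] := by rw [hd]; exact List.cons_ne_nil _ _
          have h := List.head_dropWhile_not (· == x) hnil
          have hh1 : (rest.dropWhile (· == x)).head hnil = h1 := by
            simp only [hd, List.head_cons]
          rwa [hh1] at h
        have hmem1 : h1 ∈ rest := (List.dropWhile_sublist (· == x)).subset (hd ▸ List.mem_cons_self)
        have hlt : x < h1 := lt_of_le_of_ne (hxrest h1 hmem1) (Ne.symm (ne_of_beq_false hne))
        rw [hd] at hmem
        rcases List.mem_cons.mp hmem with rfl | hmem'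
        · exact absurd rfl (ne_of_lt hlt)
        · have h1le : h1 ≤ x := by
            have := (List.pairwise_cons.mp (hd ▸ hp')).1 x hmem'
            exact this
          exact absurd (lt_of_lt_of_le hlt h1le) (lt_irrefl x)
    have hsplit : rest = rest.takeWhile (· == x) ++ rest.dropWhile (· == x) :=
      (List.takeWhile_append_dropWhile).symm
    have htake : ∀ y ∈ rest.takeWhile (· == x), y = x := by
      intro y hy
      have := List.mem_takeWhile_imp hy
      simpa using this
    rw [pvRunCount, ih hp']
    by_cases hv : v = x
    · subst hv
      have hcnt : rest.count v = (rest.takeWhile (· == v)).length := by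
        conv_lhs => rw [hsplit]
        rw [List.count_append]
        have h1 : (rest.takeWhile (· == v)).count v = (rest.takeWhile (· == v)).length :=
          List.count_eq_length.mpr (fun y hy => by simp [htake y hy])
        have h2 : (rest.dropWhile (· == v)).count v = 0 := List.count_eq_zero.mpr hxdrop
        omega
      simp only [if_neg hxdrop, List.mem_cons, true_or, if_pos]
      rw [PySem.Dict.getD_insert_self, List.count_cons_self, hcnt]
      push_cast; ring
    · have hvtake : v ∉ rest.takeWhile (· == x) := fun h => hv (htake v h)
      have hmemiff : v ∈ rest.dropWhile (· == x) ↔ v ∈ (x :: rest) := by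
        constructor
        · intro h; exact List.mem_cons_of_mem _ (hsplit ▸ List.mem_append_right _ h)
        · intro h
          rcases List.mem_cons.mp h with rfl | h'
          · exact absurd rfl hv
          · rcases List.mem_append.mp (hsplit ▸ h') with h1 | h2
            · exact absurd (htake v h1) hv
            · exact h2
      have hcnt : (rest.dropWhile (· == x)).count v = (x :: rest).count v := by
        have h0 : rest.count v = (rest.takeWhile (· == x)).count v + (rest.dropWhile (· == x)).count v := by
          conv_lhs => rw [hsplit]
          rw [List.count_append]
        have h1 : (rest.takeWhile (· == x)).count v = 0 := List.count_eq_zero.mpr hvtake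
        have h2 : (x == v) = false := beq_eq_false_iff_ne.mpr (Ne.symm hv)
        rw [List.count_cons, h2]
        simp only [Bool.false_eq_true, if_false]
        omega
      simp only [hmemiff, hcnt]
      split_ifs with h
      · rfl
      · exact PySem.Dict.getD_insert_of_ne counts' _ _ hv

-- B's count of v equals A's filter-length for v, under Pre_ (for signal names v ≠ "")
theorem count_agree (predictions : List (List (String × String)))
    (hpre : Pre_get_market_outlook_py predictions) (v : String) :
    (pvRunCount (PySem.List.sorted (predictions.map (fun p => ((PySem.Dict.mk p).get? "prediction").getD "")) (fun s => s) false) PySem.Dict.empty).getD v 0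
      = ((predictions.filter (fun p => (PySem.Dict.mk p).get? "prediction" == some v)).length : Int) := by
  set labels := predictions.map (fun p => ((PySem.Dict.mk p).get? "prediction").getD "") with hl
  have hsortp : (PySem.List.sorted labels (fun s => s) false).Pairwise (· ≤ ·) := by
    simpa using PySem.List.sorted_pairwise labels (fun s => s)
  rw [pvRunCount_getD v _ _ hsortp, PySem.Dict.getD_empty]
  have hcnt : ((PySem.List.sorted labels (fun s => s) false).count v : Int)
      = ((predictions.filter (fun p => (PySem.Dict.mk p).get? "prediction" == some v)).length : Int) := by
    rw [(PySem.List.sorted_perm labels (fun s => s) false).count_eq]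
    norm_cast
    rw [hl, List.count_eq_countP, List.countP_map, ← List.countP_eq_length_filter]
    refine List.countP_congr ?_
    intro p hp
    have hc := hpre p hp
    have hsome : ((PySem.Dict.mk p).get? "prediction").isSome := by
      apply get?_isSome_of_mem
      simpa [PySem.Dict.contains] using hc
    obtain ⟨w, hw⟩ := Option.isSome_iff_exists.mp hsome
    simp [Function.comp, hw]
  split_ifs with h
  · exact hcnt
  · rw [← hcnt]
    have : (PySem.List.sorted labels (fun s => s) false).count v = 0 :=
      List.count_eq_zero.mpr h
    simp [this]

-- ===== VERDICT =====
theorem get_market_outlook_py_spec : Claim_equal_get_market_outlook_py := by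
  intro predictions _ hpre
  unfold Spec_get_market_outlook_py get_market_outlook_py get_market_outlook_py_alt
  simp only [count_agree predictions hpre "BUY",
      count_agree predictions hpre "SELL",
      count_agree predictions hpre "HOLD"]
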